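-- pv_equiv track=rewrite | github.com/erelke/ha-esolar | custom_components/saj_esolar_air/elekeeper.py | hex_string_to_signed_array
-- ===== SOURCE A (Python) =====
-- def hex_string_to_signed_array(hex_str):
--     """Hexadecimális karakterlánc átalakítása előjeles 32 bites számokat tartalmazó tömbbé."""
--     t = len(hex_str)
--     n = [0] * ((t + 7) // 8)  # Létrehozunk egy megfelelő méretű listát
--
--     for r in range(0, t, 2):
--         byte_val = int(hex_str[r:r + 2], 16)  # Hexadecimális érték konvertálása
--         n[r >> 3] |= byte_val << (24 - (r % 8) * 4)  # Biteltolás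
--
--     # Az előjeles 32 bites konverzió biztosítása
--     n = [(x & 0x7FFFFFFF) - (x & 0x80000000) for x in n]
--
--     return n
-- ===== SOURCE B (Python) =====
-- def hex_string_to_signed_array(hex_str):
--     """Hexadecimális karakterlánc átalakítása előjeles 32 bites számokat tartalmazó tömbbé."""
--     data = bytes(int(hex_str[i:i + 2], 16) for i in range(0, len(hex_str), 2))
--     return [int.from_bytes(data[i:i + 4].ljust(4, b'\x00'), 'big', signed=True)
--             for i in range(0, len(data), 4)]
-- ===== Notes on version B (the rewrite author's own statement) =====
-- stated objective: idiomatic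
-- what changed: Replaces the index-addressed list with in-place OR/shift accumulation and the explicit sign-correction map by a two-pass pipeline: build a bytes buffer from the 2-char groups, then decode each right-padded 4-byte chunk with int.from_bytes as a signed big-endian integer.
-- outside the precondition, e.g. on hex_string_to_signed_array('-1'): A returns [-16777216], B raises ValueError
import Mathlib
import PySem

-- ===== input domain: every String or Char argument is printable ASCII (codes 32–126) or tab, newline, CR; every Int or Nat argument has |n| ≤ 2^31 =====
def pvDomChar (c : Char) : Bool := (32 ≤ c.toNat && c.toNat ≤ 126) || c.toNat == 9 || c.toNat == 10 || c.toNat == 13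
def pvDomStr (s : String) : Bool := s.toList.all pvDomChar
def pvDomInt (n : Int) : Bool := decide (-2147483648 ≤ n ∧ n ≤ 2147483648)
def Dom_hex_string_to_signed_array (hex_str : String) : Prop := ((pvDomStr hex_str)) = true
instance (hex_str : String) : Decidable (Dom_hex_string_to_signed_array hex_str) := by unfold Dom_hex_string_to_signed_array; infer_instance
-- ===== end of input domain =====

-- B replaces A's index-addressed OR/shift accumulation plus sign-correction pass by a byte buffer
-- decoded in right-padded 4-byte big-endian signed chunks (objective: idiomatic; same cost).

-- ===== PORT A =====
def hex_string_to_signed_array (hex_str : String) : List Int :=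
  let cs := hex_str.toList
  let t : Int := cs.length
  -- n = [0] * ((t + 7) // 8)
  let n0 : List Int := List.replicate (PySem.Int.floordiv (t + 7) 8).toNat 0
  -- for r in range(0, t, 2): n[r >> 3] |= int(hex_str[r:r+2], 16) << (24 - (r % 8) * 4)
  -- int(…, 16) is PySem.Int.ofCharsBase?; none (ValueError) is excluded by Pre_, .getD 0 there.
  -- the index r >> 3 and the shift are in range for every r the loop visits, so .toNat is exact.
  let n := (PySem.List.pyRange 0 t 2).foldl (fun n r =>
      let byte_val : Int :=
        (PySem.Int.ofCharsBase? (PySem.List.slice cs (some r) (some (r + 2))) 16).getD 0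
      let i := (r >>> (3 : Int)).toNat
      n.set i (PySem.Int.bor (n.getD i 0) (byte_val <<< (24 - PySem.Int.mod r 8 * 4).toNat))) n0
  -- [(x & 0x7FFFFFFF) - (x & 0x80000000) for x in n]
  n.map (fun x => PySem.Int.band x 0x7FFFFFFF - PySem.Int.band x 0x80000000)

-- ===== PORT B =====
-- bytes ljust(4, b'\x00') of a chunk of ≤ 4 byte values
def pvLjust4 (bs : List Int) : List Int := bs ++ List.replicate (4 - bs.length) 0
-- int.from_bytes(chunk, 'big', signed=True): exact for a 4-element list of byte values 0..255
def pvFromBytesSignedBE (bs : List Int) : Int :=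
  let u := bs.foldl (fun acc b => acc * 256 + b) 0
  if 2147483648 ≤ u then u - 4294967296 else u

def hex_string_to_signed_array_alt (hex_str : String) : List Int :=
  let cs := hex_str.toList
  -- data = bytes(int(hex_str[i:i+2], 16) for i in range(0, len(hex_str), 2))
  let data : List Int := (PySem.List.pyRange 0 (cs.length : Int) 2).map (fun i =>
      (PySem.Int.ofCharsBase? (PySem.List.slice cs (some i) (some (i + 2))) 16).getD 0)
  -- [int.from_bytes(data[i:i+4].ljust(4, b'\x00'), 'big', signed=True) for i in range(0, len(data), 4)]
  (PySem.List.pyRange 0 (data.length : Int) 4).map (fun i =>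
      pvFromBytesSignedBE (pvLjust4 (PySem.List.slice data (some i) (some (i + 4)))))

-- ===== PRECONDITION & SPEC =====
-- Pre_ excludes inputs where some 2-character group (or trailing 1-character group) of hex_str does
-- not parse via int(·, 16) to a nonnegative value: if it fails to parse, A raises ValueError, and if
-- it parses negative (a '-' sign inside a group) B's bytes() raises ValueError while A returns — see cites.
def Pre_hex_string_to_signed_array (hex_str : String) : Prop :=
  ∀ r ∈ PySem.List.pyRange 0 (hex_str.toList.length : Int) 2,
    0 ≤ (PySem.Int.ofCharsBase? (PySem.List.slice hex_str.toList (some r) (some (r + 2))) 16).getD (-1) ∧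
    (PySem.Int.ofCharsBase? (PySem.List.slice hex_str.toList (some r) (some (r + 2))) 16).getD (-1) < 256
instance (hex_str : String) : Decidable (Pre_hex_string_to_signed_array hex_str) := by
  unfold Pre_hex_string_to_signed_array; infer_instance

def pvWitness_hex_string_to_signed_array : String := "1a2b3c4d5e"

def Spec_hex_string_to_signed_array (hex_str : String) (out : List Int) : Prop := out = hex_string_to_signed_array_alt hex_str
instance (hex_str : String) (out : List Int) : Decidable (Spec_hex_string_to_signed_array hex_str out) := by unfold Spec_hex_string_to_signed_array; infer_instance

-- ===== CLAIM (what is proved, stated in full; the proofs are below) =====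
def Claim_equal_hex_string_to_signed_array : Prop := ∀ (hex_str : String), Dom_hex_string_to_signed_array hex_str → Pre_hex_string_to_signed_array hex_str → Spec_hex_string_to_signed_array hex_str (hex_string_to_signed_array hex_str)


-- ===== LEMMAS AND PROOFS =====

-- the sign-correction A applies element-wise
def pvSgn (x : Int) : Int := PySem.Int.band x 0x7FFFFFFF - PySem.Int.band x 0x80000000
-- B's byte buffer
def pvData (cs : List Char) : List Int :=
  (PySem.List.pyRange 0 (cs.length : Int) 2).map (fun i =>
      (PySem.Int.ofCharsBase? (PySem.List.slice cs (some i) (some (i + 2))) 16).getD 0)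

-- disjoint OR is addition (Nat)
lemma pvOrAdd (k : Nat) : ∀ a b : Nat, a % 2 ^ k = 0 → b < 2 ^ k → (a ||| b) = a + b := by
  induction k with
  | zero =>
    intro a b _ hb
    have hb0 : b = 0 := by simpa [Nat.lt_one_iff] using hb
    subst hb0; simp
  | succ k ih =>
    intro a b ha hb
    have h2 : 2 ∣ a := dvd_trans (dvd_pow_self 2 (Nat.succ_ne_zero k)) (Nat.dvd_of_mod_eq_zero ha)
    obtain ⟨a', rfl⟩ := h2
    have hd : 2 ^ k ∣ a' := by
      have hd0 : 2 ^ (k + 1) ∣ 2 * a' := Nat.dvd_of_mod_eq_zero ha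
      rw [pow_succ'] at hd0
      exact (Nat.mul_dvd_mul_iff_left (by norm_num : 0 < 2)).mp hd0
    have ha' : a' % 2 ^ k = 0 := Nat.mod_eq_zero_of_dvd hd
    have hb2 : b / 2 < 2 ^ k := by
      have hp : (2 : Nat) ^ (k + 1) = 2 * 2 ^ k := by rw [pow_succ']
      omega
    have key := ih a' (b / 2) ha' hb2
    calc 2 * a' ||| b
        = Nat.bit false a' ||| Nat.bit (decide (b % 2 = 1)) (b >>> 1) := by
          rw [Nat.bit_decide_mod_two_eq_one_shiftRight_one,
            show Nat.bit false a' = 2 * a' from by simp [Nat.bit_val]]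
      _ = Nat.bit (false || decide (b % 2 = 1)) (a' ||| b >>> 1) := Nat.lor_bit _ _ _ _
      _ = 2 * a' + b := by
          rw [Bool.false_or, Nat.shiftRight_one, key, Nat.bit_val]
          rcases Nat.mod_two_eq_zero_or_one b with h | h <;> simp [h] <;> omega

-- disjoint OR is addition (Int, nonneg)
lemma pvBorAddInt (a b : Int) (k : Nat) (ha : 0 ≤ a) (ham : a % ((2 ^ k : Nat) : Int) = 0)
    (hb : 0 ≤ b) (hbk : b < ((2 ^ k : Nat) : Int)) : PySem.Int.bor a b = a + b := by
  have hA : a.toNat % 2 ^ k = 0 := by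
    have h1 : ((a.toNat % 2 ^ k : Nat) : Int) = 0 := by
      rw [Int.natCast_mod, Int.toNat_of_nonneg ha]; exact ham
    exact_mod_cast h1
  have hB : b.toNat < 2 ^ k := by
    have h1 : ((b.toNat : Nat) : Int) < ((2 ^ k : Nat) : Int) := by
      rw [Int.toNat_of_nonneg hb]; exact hbk
    exact_mod_cast h1
  rw [PySem.Int.bor_of_nonneg ha hb, pvOrAdd k _ _ hA hB]
  push_cast
  rw [Int.toNat_of_nonneg ha, Int.toNat_of_nonneg hb]

-- sign correction on a 32-bit value
lemma pvSgnEq (u : Int) (h0 : 0 ≤ u) (h1 : u < 4294967296) :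
    pvSgn u = if 2147483648 ≤ u then u - 4294967296 else u := by
  unfold pvSgn
  rw [PySem.Int.band_of_nonneg h0 (by norm_num), PySem.Int.band_of_nonneg h0 (by norm_num)]
  rw [show (2147483647 : Int).toNat = 2 ^ 31 - 1 from by decide,
      Nat.and_two_pow_sub_one_eq_mod,
      show (2147483648 : Int).toNat = 2 ^ 31 from by decide,
      Nat.and_two_pow, Nat.testBit_eq_decide_div_mod_eq,
      show (2 : Nat) ^ 31 = 2147483648 from by norm_num]
  by_cases hc : u.toNat / 2147483648 % 2 = 1 <;> simp [hc] <;> split_ifs <;> omega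

-- Int shift-left is multiplication by a power of two
lemma pvShl (v : Int) (s : Nat) : v <<< s = v * 2 ^ s := by
  calc v <<< s = v <<< ((s : Nat) : Int) := (Int.shiftLeft_natCast_right v s).symm
    _ = v * ((2 ^ s : Nat) : Int) := Int.shiftLeft_eq_mul_pow v s
    _ = v * 2 ^ s := by push_cast; ring

lemma pvShl0 (v : Int) : v <<< (0 : Nat) = v := by rw [pvShl]; ring

-- one word: A's OR/shift chain followed by the sign fix is B's signed big-endian decode
lemma pvWordSgn (b0 b1 b2 b3 : Int)
    (h0 : 0 ≤ b0 ∧ b0 < 256) (h1 : 0 ≤ b1 ∧ b1 < 256)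
    (h2 : 0 ≤ b2 ∧ b2 < 256) (h3 : 0 ≤ b3 ∧ b3 < 256) :
    pvSgn (PySem.Int.bor (PySem.Int.bor (PySem.Int.bor (PySem.Int.bor 0 (b0 <<< (24 : Nat)))
        (b1 <<< (16 : Nat))) (b2 <<< (8 : Nat))) b3)
      = pvFromBytesSignedBE [b0, b1, b2, b3] := by
  have hc : PySem.Int.bor (PySem.Int.bor (PySem.Int.bor (PySem.Int.bor 0 (b0 <<< (24 : Nat)))
        (b1 <<< (16 : Nat))) (b2 <<< (8 : Nat))) b3
      = (((0 * 256 + b0) * 256 + b1) * 256 + b2) * 256 + b3 := by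
    rw [PySem.Int.bor_comm 0 _, PySem.Int.bor_zero, pvShl b0 24, pvShl b1 16, pvShl b2 8]
    rw [pvBorAddInt (b0 * 2 ^ 24) (b1 * 2 ^ 16) 24
          (mul_nonneg h0.1 (by norm_num))
          (by push_cast; omega)
          (mul_nonneg h1.1 (by norm_num))
          (by push_cast; omega)]
    rw [pvBorAddInt (b0 * 2 ^ 24 + b1 * 2 ^ 16) (b2 * 2 ^ 8) 16
          (add_nonneg (mul_nonneg h0.1 (by norm_num)) (mul_nonneg h1.1 (by norm_num)))
          (by push_cast; omega)
          (mul_nonneg h2.1 (by norm_num))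
          (by push_cast; omega)]
    rw [pvBorAddInt (b0 * 2 ^ 24 + b1 * 2 ^ 16 + b2 * 2 ^ 8) b3 8
          (add_nonneg (add_nonneg (mul_nonneg h0.1 (by norm_num)) (mul_nonneg h1.1 (by norm_num)))
            (mul_nonneg h2.1 (by norm_num)))
          (by push_cast; omega)
          h3.1
          (by push_cast; omega)]
    ring
  rw [hc, pvSgnEq _ (by omega) (by omega)]
  simp only [pvFromBytesSignedBE, List.foldl_cons, List.foldl_nil]

-- pushing a fold that only touches indices ≥ 1 under a cons
lemma pvFoldCons (g : Nat → Int) (L : List Nat) : ∀ (a : Int) (s : List Int),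
    L.foldl (fun n j => n.set (j / 4 + 1) (PySem.Int.bor (n[j / 4 + 1]?.getD 0) (g j))) (a :: s)
    = a :: L.foldl (fun n j => n.set (j / 4) (PySem.Int.bor (n[j / 4]?.getD 0) (g j))) s := by
  induction L with
  | nil => intro a s; rfl
  | cons x L ih =>
    intro a s
    simp only [List.foldl_cons, List.set_cons_succ, List.getElem?_cons_succ]
    exact ih _ _

-- the generic equivalence on a byte list
lemma pvMain (N : Nat) : ∀ (d : List Int), d.length ≤ N → (∀ b ∈ d, 0 ≤ b ∧ b < 256) →
    ((List.range d.length).foldl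
        (fun n j => n.set (j / 4) (PySem.Int.bor (n.getD (j / 4) 0) ((d.getD j 0) <<< (24 - j % 4 * 8))))
        (List.replicate ((d.length + 3) / 4) 0)).map pvSgn
      = (List.range ((d.length + 3) / 4)).map
          (fun w => pvFromBytesSignedBE (pvLjust4 ((d.drop (4 * w)).take 4))) := by
  induction N with
  | zero =>
    intro d hle _
    have hd : d = [] := List.length_eq_zero_iff.mp (Nat.le_zero.mp hle)
    subst hd; simp
  | succ N ih =>
    intro d hle hb
    match d with
    | [] => simp
    | [b0] =>
      have w := pvWordSgn b0 0 0 0 (hb b0 (by simp)) (by norm_num) (by norm_num) (by norm_num)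
      simp only [Int.zero_shiftLeft, PySem.Int.bor_zero] at w
      norm_num [show List.range 1 = [0] from rfl, List.foldl_cons, List.foldl_nil,
        List.set_cons_zero, List.getD_cons_zero, List.map_cons, List.map_nil,
        List.length_cons, List.length_nil, List.replicate_one,
        show pvLjust4 ((([b0] : List Int).drop 0).take 4) = [b0, 0, 0, 0] from rfl]
      exact w
    | [b0, b1] =>
      have w := pvWordSgn b0 b1 0 0 (hb b0 (by simp)) (hb b1 (by simp)) (by norm_num) (by norm_num)
      simp only [Int.zero_shiftLeft, PySem.Int.bor_zero] at w
      norm_num [show List.range 2 = [0, 1] from rfl, List.foldl_cons, List.foldl_nil,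
        List.set_cons_zero, List.getD_cons_zero, List.getD_cons_succ, List.map_cons, List.map_nil,
        List.length_cons, List.length_nil, List.replicate_one,
        show pvLjust4 ((([b0, b1] : List Int).drop 0).take 4) = [b0, b1, 0, 0] from rfl]
      exact w
    | [b0, b1, b2] =>
      have w := pvWordSgn b0 b1 b2 0 (hb b0 (by simp)) (hb b1 (by simp)) (hb b2 (by simp)) (by norm_num)
      simp only [PySem.Int.bor_zero] at w
      norm_num [show List.range 3 = [0, 1, 2] from rfl, List.foldl_cons, List.foldl_nil,
        List.set_cons_zero, List.getD_cons_zero, List.getD_cons_succ, List.map_cons, List.map_nil,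
        List.length_cons, List.length_nil, List.replicate_one,
        show pvLjust4 ((([b0, b1, b2] : List Int).drop 0).take 4) = [b0, b1, b2, 0] from rfl]
      exact w
    | b0 :: b1 :: b2 :: b3 :: rest =>
      simp only [List.length_cons]
      rw [show rest.length + 1 + 1 + 1 + 1 = 4 + rest.length from by omega]
      rw [List.range_add, List.foldl_append]
      rw [show (4 + rest.length + 3) / 4 = (rest.length + 3) / 4 + 1 from by omega]
      rw [List.replicate_succ]
      rw [show List.range 4 = [0, 1, 2, 3] from rfl]
      norm_num [List.foldl_cons, List.foldl_nil, List.set_cons_zero, List.getD_cons_zero,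
        show ((b0 :: b1 :: b2 :: b3 :: rest : List Int)).getD 1 0 = b1 from rfl,
        show ((b0 :: b1 :: b2 :: b3 :: rest : List Int)).getD 2 0 = b2 from rfl,
        show ((b0 :: b1 :: b2 :: b3 :: rest : List Int)).getD 3 0 = b3 from rfl,
        pvShl0]
      rw [List.foldl_map]
      simp only [show ∀ j : Nat, (4 + j) / 4 = j / 4 + 1 from fun j => by omega,
        show ∀ j : Nat, (4 + j) % 4 = j % 4 from fun j => by omega,
        show ∀ j : Nat, ((b0 :: b1 :: b2 :: b3 :: rest : List Int))[4 + j]?.getD 0 = rest[j]?.getD 0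
          from fun j => by
            rw [show 4 + j = j + 1 + 1 + 1 + 1 from by omega]
            simp]
      rw [pvFoldCons (fun j => rest[j]?.getD 0 <<< (24 - j % 4 * 8))]
      rw [List.map_cons]
      rw [show (rest.length + 3) / 4 + 1 = 1 + (rest.length + 3) / 4 from by omega,
        List.range_add, List.map_append, List.map_map,
        show List.range 1 = [0] from rfl]
      simp only [List.map_cons, List.map_nil, Function.comp_def]
      rw [show ((b0 :: b1 :: b2 :: b3 :: rest : List Int)).drop (4 * 0) = b0 :: b1 :: b2 :: b3 :: rest from rfl]
      simp only [show ∀ w : Nat,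
          ((b0 :: b1 :: b2 :: b3 :: rest : List Int)).drop (4 * (1 + w)) = rest.drop (4 * w)
        from fun w => by
          rw [show 4 * (1 + w) = 4 * w + 1 + 1 + 1 + 1 from by omega]
          simp [List.drop_succ_cons]]
      rw [show ((b0 :: b1 :: b2 :: b3 :: rest : List Int)).take 4 = [b0, b1, b2, b3] from rfl,
        show pvLjust4 [b0, b1, b2, b3] = [b0, b1, b2, b3] from rfl]
      congr 1
      · exact pvWordSgn b0 b1 b2 b3 (hb b0 (by simp)) (hb b1 (by simp)) (hb b2 (by simp)) (hb b3 (by simp))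
      · have htail := ih rest (by simp only [List.length_cons] at hle; omega)
          (fun b hbm => hb b (by simp [hbm]))
        exact htail

lemma pvIdx (k : Nat) : ((0 + 2 * (k : Int)) >>> (3 : Int)).toNat = k / 4 := by
  rw [show (0 + 2 * (k : Int)) = ((2 * k : Nat) : Int) from by push_cast; ring,
    show (3 : Int) = ((3 : Nat) : Int) from rfl, Int.shiftRight_natCast, Int.toNat_natCast,
    Nat.shiftRight_eq_div_pow]
  omega

lemma pvSh (k : Nat) : (24 - PySem.Int.mod (0 + 2 * (k : Int)) 8 * 4).toNat = 24 - k % 4 * 8 := by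
  rw [show (0 + 2 * (k : Int)) = ((2 * k : Nat) : Int) from by push_cast; ring,
    show (8 : Int) = ((8 : Nat) : Int) from rfl, PySem.Int.mod_natCast]
  omega

lemma pvInit (L : Nat) : (PySem.Int.floordiv ((L : Int) + 7) 8).toNat = ((L + 1) / 2 + 3) / 4 := by
  rw [show ((L : Int) + 7) = ((L + 7 : Nat) : Int) from by push_cast; ring,
    show (8 : Int) = ((8 : Nat) : Int) from rfl, PySem.Int.floordiv_natCast, Int.toNat_natCast]
  omega

lemma pvMval (L : Nat) :
    (if (0 : Int) < (L : Int) then (((L : Int) - 0 + 2 - 1) / 2).toNat else 0) = (L + 1) / 2 := by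
  split_ifs with h
  · rw [show ((L : Int) - 0 + 2 - 1) = ((L + 1 : Nat) : Int) from by push_cast; ring,
      show (2 : Int) = ((2 : Nat) : Int) from rfl, ← Int.natCast_div, Int.toNat_natCast]
  · have hL : L = 0 := by omega
    simp [hL]

lemma pvWval (m : Nat) :
    (if (0 : Int) < (m : Int) then (((m : Int) - 0 + 4 - 1) / 4).toNat else 0) = (m + 3) / 4 := by
  split_ifs with h
  · rw [show ((m : Int) - 0 + 4 - 1) = ((m + 3 : Nat) : Int) from by push_cast; ring,
      show (4 : Int) = ((4 : Nat) : Int) from rfl, ← Int.natCast_div, Int.toNat_natCast]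
  · have hm : m = 0 := by omega
    simp [hm]

lemma pvSlice4 (D : List Int) (w : Nat) :
    PySem.List.slice D (some (0 + 4 * (w : Int))) (some (0 + 4 * (w : Int) + 4))
      = (D.drop (4 * w)).take 4 := by
  rw [PySem.List.slice_toNat D (by positivity) (by positivity),
    show ((0 : Int) + 4 * (w : Int)).toNat = 4 * w from by omega,
    show ((0 : Int) + 4 * (w : Int) + 4).toNat = 4 * w + 4 from by omega,
    show 4 * w + 4 - 4 * w = 4 from by omega]

-- A reduces to the generic fold over the byte buffer
lemma pvAred (s : String) :
    hex_string_to_signed_array s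
      = ((List.range (pvData s.toList).length).foldl
          (fun n j => n.set (j / 4) (PySem.Int.bor (n.getD (j / 4) 0)
              (((pvData s.toList).getD j 0) <<< (24 - j % 4 * 8))))
          (List.replicate (((pvData s.toList).length + 3) / 4) 0)).map pvSgn := by
  simp only [hex_string_to_signed_array, pvData]
  rw [PySem.List.pyRange_of_pos 0 ((s.toList.length : Int)) (show (0 : Int) < 2 by norm_num)]
  simp only [List.length_map, List.length_range, List.map_map]
  rw [pvMval s.toList.length, pvInit s.toList.length]
  rw [List.foldl_map]
  refine congrArg (List.map pvSgn) ?_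
  apply PySem.List.foldl_congr_mem
  intro acc k hk
  have hkM : k < (s.toList.length + 1) / 2 := List.mem_range.mp hk
  rw [pvIdx k, pvSh k, PySem.List.getD_map_range _ _ _ _ hkM]
  simp only [Function.comp_apply]

-- B reduces to the chunk map over the byte buffer
lemma pvBred (s : String) :
    hex_string_to_signed_array_alt s
      = (List.range (((pvData s.toList).length + 3) / 4)).map
          (fun w => pvFromBytesSignedBE (pvLjust4 (((pvData s.toList).drop (4 * w)).take 4))) := by
  simp only [hex_string_to_signed_array_alt, pvData]
  rw [PySem.List.pyRange_of_pos 0 ((s.toList.length : Int)) (show (0 : Int) < 2 by norm_num)]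
  simp only [List.length_map, List.length_range]
  rw [pvMval s.toList.length]
  rw [PySem.List.pyRange_of_pos 0 (((s.toList.length + 1) / 2 : Nat) : Int) (show (0 : Int) < 4 by norm_num)]
  rw [pvWval ((s.toList.length + 1) / 2)]
  rw [List.map_map]
  refine List.map_congr_left ?_
  intro w _
  simp only [Function.comp_apply]
  rw [pvSlice4]

lemma pvBounds (s : String) (h : Pre_hex_string_to_signed_array s) :
    ∀ b ∈ pvData s.toList, 0 ≤ b ∧ b < 256 := by
  intro b hbm
  unfold pvData at hbm
  obtain ⟨r, hr, rfl⟩ := List.mem_map.mp hbm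
  have hp := h r hr
  cases hopt : PySem.Int.ofCharsBase? (PySem.List.slice s.toList (some r) (some (r + 2))) 16 with
  | none =>
    rw [hopt] at hp
    simp at hp
  | some v =>
    rw [hopt] at hp
    simpa using hp

-- ===== VERDICT (by name: the statement is the Claim_ definition above) =====
theorem hex_string_to_signed_array_spec : Claim_equal_hex_string_to_signed_array := by
  intro s _ hPre
  unfold Spec_hex_string_to_signed_array
  rw [pvAred, pvBred]
  exact pvMain (pvData s.toList).length (pvData s.toList) le_rfl (pvBounds s hPre)
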